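-- pv_equiv track=rewrite | github.com/WMT-QE-Task/qe-eval-scripts | wmt24/Task_3_APE/ter.py | _find_shifted_pairs
-- ===== SOURCE A (Python) =====
-- from typing import List, Dict, Tuple
--
-- _MAX_SHIFT_SIZE = 10
--
-- _MAX_SHIFT_DIST = 50
--
-- def _find_shifted_pairs(words_h: List[str], words_r: List[str]):
--     """Find matching word sub-sequences in two lists of words.
--
--     Ignores sub-sequences starting at the same position.
--
--     :param words_h: First word list.
--     :param words_r: Second word list.
--     :return: Yields tuples of (h_start, r_start, length) such that:
--          words_h[h_start:h_start+length] = words_r[r_start:r_start+length]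
--     """
--     n_words_h = len(words_h)
--     n_words_r = len(words_r)
--     for start_h in range(n_words_h):
--         for start_r in range(n_words_r):
--             # this is slightly different from what tercom does but this should
--             # really only kick in in degenerate cases
--             if abs(start_r - start_h) > _MAX_SHIFT_DIST:
--                 continue
--
--             length = 0
--             while words_h[start_h + length] == words_r[start_r + length] and length < _MAX_SHIFT_SIZE:
--                 length += 1
--
--                 yield start_h, start_r, length
--
--                 # If one sequence is consumed, stop processing
--                 if n_words_h == start_h + length or n_words_r == start_r + length:
--                     break
-- ===== SOURCE B (Python) =====
-- from typing import List
--
-- _MAX_SHIFT_SIZE = 10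
--
-- _MAX_SHIFT_DIST = 50
--
--
-- def _find_shifted_pairs(words_h: List[str], words_r: List[str]):
--     """Inverted-index version: candidate reference starts come from a word->positions
--     index of words_r, and for each candidate the whole run length is computed first
--     (longest common extension, capped) and the (start_h, start_r, 1..length) triples
--     are emitted afterwards, instead of interleaving comparison and yielding."""
--     index = {}
--     for i, w in enumerate(words_r):
--         index.setdefault(w, []).append(i)
--
--     for start_h in range(len(words_h)):
--         for start_r in index.get(words_h[start_h], []):
--             if abs(start_r - start_h) > _MAX_SHIFT_DIST:
--                 continue
--
--             # longest common extension, capped at _MAX_SHIFT_SIZE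
--             length = 0
--             for a, b in zip(words_h[start_h:start_h + _MAX_SHIFT_SIZE],
--                             words_r[start_r:start_r + _MAX_SHIFT_SIZE]):
--                 if a != b:
--                     break
--                 length += 1
--
--             for l in range(1, length + 1):
--                 yield start_h, start_r, l
-- ===== Notes on version B (the rewrite author's own statement) =====
-- stated objective: alternative
-- what changed: B replaces the scan over every reference start by an inverted index (word -> ascending positions in words_r) so only matching starts are visited, and replaces the interleaved compare-and-yield while loop by first computing the capped longest common extension and then emitting the triples for lengths 1..L.
import Mathlib
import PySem

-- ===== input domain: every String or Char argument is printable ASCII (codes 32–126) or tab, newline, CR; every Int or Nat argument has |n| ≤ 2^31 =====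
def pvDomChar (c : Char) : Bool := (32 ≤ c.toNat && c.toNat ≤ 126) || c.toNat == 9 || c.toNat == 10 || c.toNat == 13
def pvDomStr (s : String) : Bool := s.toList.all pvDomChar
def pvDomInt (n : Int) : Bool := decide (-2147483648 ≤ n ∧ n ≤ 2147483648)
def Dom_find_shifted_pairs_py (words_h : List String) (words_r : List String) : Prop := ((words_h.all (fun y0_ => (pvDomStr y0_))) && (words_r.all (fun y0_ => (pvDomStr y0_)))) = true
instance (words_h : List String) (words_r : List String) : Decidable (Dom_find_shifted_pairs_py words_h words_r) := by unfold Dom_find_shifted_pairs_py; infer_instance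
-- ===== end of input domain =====

-- B replaces A's scan over every reference start by an inverted index of words_r and
-- computes each run's full length before emitting the triples, instead of A's
-- interleaved compare-and-yield while loop (objective: alternative algorithm).

-- ===== PORT A =====

-- A's inner `while` loop: compares, increments, yields, and breaks when a sequence is
-- consumed. In every reachable call the indices are in range (the break after each
-- yield guarantees it), so the pyGetD default "" is never read.
def pvExtend (wh wr : List String) (sh sr : Int) (length : Nat) : List (List Int) :=
  if h : (PySem.List.pyGetD wh (sh + length) "" == PySem.List.pyGetD wr (sr + length) "") = true
         ∧ length < 10 then
    let length' := length + 1
    [sh, sr, (length' : Int)] ::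
      (if ((wh.length : Int) == sh + length' || (wr.length : Int) == sr + length') then []
       else pvExtend wh wr sh sr length')
  else []
  termination_by 10 - length
  decreasing_by omega

def find_shifted_pairs_py (words_h : List String) (words_r : List String) : List (List Int) :=
  (PySem.List.pyRange 0 (words_h.length : Int) 1).flatMap (fun start_h =>
    (PySem.List.pyRange 0 (words_r.length : Int) 1).flatMap (fun start_r =>
      if (start_r - start_h).natAbs > 50 then []
      else pvExtend words_h words_r start_h start_r 0))

-- ===== PORT B =====

-- the `for a, b in zip(...): if a != b: break; length += 1` counting loop of Source B
def pvLce : List (String × String) → Nat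
  | p :: rest => if p.1 == p.2 then pvLce rest + 1 else 0
  | [] => 0

def find_shifted_pairs_py_alt (words_h : List String) (words_r : List String) : List (List Int) :=
  -- index: word -> ascending list of its positions in words_r, built by
  -- `index.setdefault(w, []).append(i)`, i.e. modify w [] (· ++ [i])
  let index : PySem.Dict String (List Int) :=
    (PySem.List.enumerate words_r).foldl
      (fun d p => d.modify p.2 [] (fun l => l ++ [p.1])) PySem.Dict.empty
  (PySem.List.pyRange 0 (words_h.length : Int) 1).flatMap (fun start_h =>
    (index.getD (PySem.List.pyGetD words_h start_h "") []).flatMap (fun start_r =>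
      if (start_r - start_h).natAbs > 50 then []
      else
        let length := pvLce ((PySem.List.slice words_h (some start_h) (some (start_h + 10))).zip
                             (PySem.List.slice words_r (some start_r) (some (start_r + 10))))
        (PySem.List.pyRange 1 ((length : Int) + 1) 1).map (fun l => [start_h, start_r, l])))

-- ===== PRECONDITION & SPEC =====
def Spec_find_shifted_pairs_py (words_h : List String) (words_r : List String) (out : List (List Int)) : Prop := out = find_shifted_pairs_py_alt words_h words_r
instance (words_h : List String) (words_r : List String) (out : List (List Int)) : Decidable (Spec_find_shifted_pairs_py words_h words_r out) := by unfold Spec_find_shifted_pairs_py; infer_instance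

-- ===== CLAIM (what is proved, stated in full; the proofs are below) =====
def Claim_equal_find_shifted_pairs_py : Prop := ∀ (words_h : List String) (words_r : List String), Dom_find_shifted_pairs_py words_h words_r → Spec_find_shifted_pairs_py words_h words_r (find_shifted_pairs_py words_h words_r)

-- ===== LEMMAS AND PROOFS =====

-- the inverted index looked up at w is exactly the ascending positions of w in words_r
lemma pv_index_getD (wr : List String) (w : String) :
    (((PySem.List.enumerate wr).foldl
        (fun d p => d.modify p.2 [] (fun l => l ++ [p.1])) PySem.Dict.empty).getD w [])
    = (((PySem.List.enumerate wr).filter (fun p => p.2 == w)).map (·.1)) := by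
  have h := List.foldl_map (l := PySem.List.enumerate wr)
    (f := fun p : Int × String => (p.2, p.1))
    (g := fun (d : PySem.Dict String (List Int)) q => d.modify q.1 [] (fun l => l ++ [q.2]))
    (init := PySem.Dict.empty)
  simp only [] at h
  rw [← h]
  rw [PySem.Dict.getD_foldl_modify_append]
  simp [List.filter_map, Function.comp_def, List.map_map]

-- members of `enumerate l s`: index ≥ s and the entry is the word at that index
lemma pv_mem_enumerate (l : List String) (s : Int) (p : Int × String)
    (hp : p ∈ PySem.List.enumerate l s) :
    s ≤ p.1 ∧ p.1 < s + l.length ∧ PySem.List.pyGetD l (p.1 - s) "" = p.2 := by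
  induction l generalizing s with
  | nil => simp [PySem.List.enumerate] at hp
  | cons x xs ih =>
    rw [PySem.List.enumerate_cons] at hp
    rcases List.mem_cons.1 hp with h | h
    · subst h; refine ⟨le_refl _, by simp, by simp⟩
    · obtain ⟨h1, h1b, h2⟩ := ih (s+1) h
      refine ⟨by omega, by simp; omega, ?_⟩
      have : p.1 - s = ((p.1 - s).toNat : Int) := by omega
      rw [this, PySem.List.pyGetD_natCast]
      have : p.1 - (s+1) = ((p.1 - (s+1)).toNat : Int) := by omega
      rw [this, PySem.List.pyGetD_natCast] at h2
      have hn : (p.1 - s).toNat = (p.1 - (s+1)).toNat + 1 := by omega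
      rw [hn, List.getD_cons_succ]
      exact h2

-- flatMap over a filtered list = flatMap with the body guarded by the filter predicate
lemma pv_flatMap_filter {α β : Type} (l : List α) (p : α → Bool) (f : α → List β) :
    (l.filter p).flatMap f = l.flatMap (fun x => if p x then f x else []) := by
  induction l with
  | nil => rfl
  | cons x xs ih =>
    by_cases h : p x <;> simp [h, ih]

-- the zipped 10-capped slices, in drop/take normal form
lemma pv_zip_slices (wh wr : List String) (sh sr : Int) (hsh : 0 ≤ sh) (hsr : 0 ≤ sr) :
    (PySem.List.slice wh (some sh) (some (sh + 10))).zip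
      (PySem.List.slice wr (some sr) (some (sr + 10)))
    = ((wh.drop sh.toNat).take 10).zip ((wr.drop sr.toNat).take 10) := by
  rw [PySem.List.slice_toNat _ hsh (by omega), PySem.List.slice_toNat _ hsr (by omega)]
  congr 2 <;> omega

-- core: A's extend loop from state k equals emitting lengths k+1 .. k+m, where m is
-- the capped longest common extension of the remaining zipped slices
lemma pv_extend_eq_aux (wh wr : List String) (sh sr : Int) (hsh : 0 ≤ sh) (hsr : 0 ≤ sr) :
    ∀ (j : Nat) (k : Nat), 10 - k ≤ j → k ≤ 10 → sh + k < wh.length → sr + k < wr.length →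
    pvExtend wh wr sh sr k
    = (PySem.List.pyRange ((k : Int) + 1)
        ((k : Int) + (pvLce ((((wh.drop sh.toNat).take 10).zip ((wr.drop sr.toNat).take 10)).drop k) : Int) + 1) 1).map
        (fun l => [sh, sr, l]) := by
  intro j
  induction j with
  | zero =>
    intro k hj hk10 hh hr
    have h10 : k = 10 := by omega
    subst h10
    rw [pvExtend, dif_neg (by intro hc; exact absurd hc.2 (by omega))]
    have hz10 : (((wh.drop sh.toNat).take 10).zip ((wr.drop sr.toNat).take 10)).drop 10 = [] := by
      apply List.drop_eq_nil_of_le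
      simp [List.length_zip, List.length_take, List.length_drop]
    rw [hz10]
    simp only [pvLce]
    rw [show (((10:Nat) : Int) + ((0 : Nat) : Int) + 1) = ((10:Nat) : Int) + 1 by push_cast]
    rw [PySem.List.pyRange_one_eq_nil (by omega)]
    simp
  | succ j ih =>
    intro k hj hk10 hh hr
    have hkh : sh.toNat + k < wh.length := by omega
    have hkr : sr.toNat + k < wr.length := by omega
    have hz : ((((wh.drop sh.toNat).take 10).zip ((wr.drop sr.toNat).take 10)).drop k)
        = if k < 10 then
            (wh[sh.toNat + k]'hkh, wr[sr.toNat + k]'hkr) ::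
              ((((wh.drop sh.toNat).take 10).zip ((wr.drop sr.toNat).take 10)).drop (k+1))
          else [] := by
      split
      · next hlt =>
        have hlen : k < (((wh.drop sh.toNat).take 10).zip ((wr.drop sr.toNat).take 10)).length := by
          simp [List.length_zip, List.length_take, List.length_drop]; omega
        rw [List.drop_eq_getElem_cons hlen]
        congr 1
        rw [List.getElem_zip]
        congr 1 <;> · rw [List.getElem_take, List.getElem_drop]
      · next hge =>
        apply List.drop_eq_nil_of_le
        simp [List.length_zip, List.length_take, List.length_drop]; omega
    have hgh : PySem.List.pyGetD wh (sh + k) "" = wh[sh.toNat + k]'hkh := by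
      have : sh + (k : Int) = ((sh.toNat + k : Nat) : Int) := by omega
      rw [this, PySem.List.pyGetD_natCast, List.getD_eq_getElem _ _ hkh]
    have hgr : PySem.List.pyGetD wr (sr + k) "" = wr[sr.toNat + k]'hkr := by
      have : sr + (k : Int) = ((sr.toNat + k : Nat) : Int) := by omega
      rw [this, PySem.List.pyGetD_natCast, List.getD_eq_getElem _ _ hkr]
    rw [pvExtend]
    by_cases hlt : k < 10
    · rw [hz, if_pos hlt]
      by_cases heq : (wh[sh.toNat + k]'hkh == wr[sr.toNat + k]'hkr) = true
      · rw [dif_pos ⟨by rw [hgh, hgr]; exact heq, hlt⟩]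
        simp only [pvLce, heq, if_pos]
        by_cases hend : (((wh.length : Int) == sh + ((k : Int) + 1)) || ((wr.length : Int) == sr + ((k : Int) + 1))) = true
        · -- a sequence is consumed: the remaining zip is empty, one element is emitted
          rw [if_pos (by push_cast; exact_mod_cast hend)]
          have hnil : ((((wh.drop sh.toNat).take 10).zip ((wr.drop sr.toNat).take 10)).drop (k+1)) = [] := by
            apply List.drop_eq_nil_of_le
            simp only [Bool.or_eq_true, beq_iff_eq] at hend
            rcases hend with hend | hend <;>
              · simp [List.length_zip, List.length_take, List.length_drop]; omega
          rw [hnil]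
          have hb : ((k : Int) + ((pvLce ([] : List (String × String)) + 1 : Nat) : Int) + 1)
              = ((k : Int) + 1) + 1 := by simp [pvLce]
          rw [hb, PySem.List.pyRange_one_singleton]
          simp
        · rw [if_neg (by push_cast at hend ⊢; exact_mod_cast hend)]
          simp only [Bool.or_eq_true, beq_iff_eq] at hend
          push Not at hend
          have hh' : sh + (k + 1 : Nat) < wh.length := by push_cast; omega
          have hr' : sr + (k + 1 : Nat) < wr.length := by push_cast; omega
          rw [ih (k+1) (by omega) (by omega) hh' hr']  -- fuel decreases
          conv_rhs => rw [PySem.List.pyRange_one_cons (show ((k : Int) + 1)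
            < (k : Int) + ((pvLce (List.drop (k+1)
                (((wh.drop sh.toNat).take 10).zip ((wr.drop sr.toNat).take 10))) + 1 : Nat) : Int) + 1
            from by push_cast; omega)]
          simp only [List.map_cons]
          congr 1
          · push_cast; ring_nf
      · rw [dif_neg (by rw [hgh, hgr]; intro hc; exact heq hc.1)]
        simp only [pvLce, heq, if_false, Bool.false_eq_true]
        rw [show ((k : Int) + ((0 : Nat) : Int) + 1) = (k : Int) + 1 by push_cast; ring]
        rw [PySem.List.pyRange_one_eq_nil (by omega)]
        simp
    · have h10 : k = 10 := by omega
      rw [dif_neg (by intro hc; exact absurd hc.2 (by omega))]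
      rw [hz, if_neg hlt]
      simp only [pvLce]
      rw [show ((k : Int) + ((0 : Nat) : Int) + 1) = (k : Int) + 1 by push_cast; ring]
      rw [PySem.List.pyRange_one_eq_nil (by omega)]
      simp

lemma pv_extend_eq (wh wr : List String) (sh sr : Int) (hsh : 0 ≤ sh) (hsr : 0 ≤ sr)
    (k : Nat) (hk10 : k ≤ 10) (hh : sh + k < wh.length) (hr : sr + k < wr.length) :
    pvExtend wh wr sh sr k
    = (PySem.List.pyRange ((k : Int) + 1)
        ((k : Int) + (pvLce ((((wh.drop sh.toNat).take 10).zip ((wr.drop sr.toNat).take 10)).drop k) : Int) + 1) 1).map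
        (fun l => [sh, sr, l]) :=
  pv_extend_eq_aux wh wr sh sr hsh hsr 10 k (by omega) hk10 hh hr

-- ===== VERDICT (by name: the statement is the Claim_ definition above) =====
theorem find_shifted_pairs_py_spec : Claim_equal_find_shifted_pairs_py := by
  intro wh wr _
  unfold Spec_find_shifted_pairs_py find_shifted_pairs_py find_shifted_pairs_py_alt
  simp only []
  apply List.flatMap_congr
  intro a ha
  have ha' := PySem.List.mem_pyRange_one.1 ha
  rw [pv_index_getD]
  have hmapfst : PySem.List.pyRange 0 (wr.length : Int) 1
      = (PySem.List.enumerate wr).map (·.1) := by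
    rw [PySem.List.map_fst_enumerate]; norm_num
  rw [hmapfst, List.flatMap_map, List.flatMap_map, pv_flatMap_filter]
  apply List.flatMap_congr
  intro p hp
  obtain ⟨h0, h0b, hval⟩ := pv_mem_enumerate wr 0 p hp
  simp only [sub_zero] at hval
  by_cases hw : (p.2 == PySem.List.pyGetD wh a "") = true
  · simp only [hw, if_pos]
    by_cases hd : (p.1 - a).natAbs > 50
    · simp [hd]
    · rw [if_neg hd, if_neg hd]
      rw [pv_extend_eq wh wr a p.1 (by omega) h0 0 (by omega) (by push_cast; omega) (by push_cast; omega)]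
      rw [pv_zip_slices wh wr a p.1 (by omega) h0]
      simp
  · simp only [hw]
    by_cases hd : (p.1 - a).natAbs > 50
    · simp [hd]
    · rw [if_neg hd]
      rw [pvExtend]
      rw [dif_neg]
      · simp
      · intro hcon
        obtain ⟨hc1, _⟩ := hcon
        simp only [Nat.cast_zero, add_zero] at hc1
        rw [hval] at hc1
        rw [beq_iff_eq] at hc1
        exact hw (by simp [hc1])
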